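-- pv_equiv track=rewrite | github.com/EbookFoundation/free-programming-books | venv/lib/python3.9/site-packages/pip/_internal/req/req_file.py | break_args_options
-- ===== SOURCE A (Python) =====
-- def break_args_options(line: str) -> tuple[str, str]:
--     """Break up the line into an args and options string.  We only want to shlex
--     (and then optparse) the options, not the args.  args can contain markers
--     which are corrupted by shlex.
--     """
--     tokens = line.split(" ")
--     args = []
--     options = tokens[:]
--     for token in tokens:
--         if token.startswith(("-", "--")):
--             break
--         else:
--             args.append(token)
--             options.pop(0)
--     return " ".join(args), " ".join(options)
-- ===== SOURCE B (Python) =====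
-- def break_args_options(line: str) -> tuple[str, str]:
--     tokens = line.split(" ")
--     idx = next(
--         (i for i, t in enumerate(tokens) if t.startswith(("-", "--"))),
--         len(tokens),
--     )
--     return " ".join(tokens[:idx]), " ".join(tokens[idx:])
-- ===== Notes on version B (the rewrite author's own statement) =====
-- stated objective: simpler
-- what changed: Replaces the incremental two-list build-and-pop loop by computing the boundary index of the first option-flag token (one starting with a dash) once and returning joins of the two slices around it.
import Mathlib
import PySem

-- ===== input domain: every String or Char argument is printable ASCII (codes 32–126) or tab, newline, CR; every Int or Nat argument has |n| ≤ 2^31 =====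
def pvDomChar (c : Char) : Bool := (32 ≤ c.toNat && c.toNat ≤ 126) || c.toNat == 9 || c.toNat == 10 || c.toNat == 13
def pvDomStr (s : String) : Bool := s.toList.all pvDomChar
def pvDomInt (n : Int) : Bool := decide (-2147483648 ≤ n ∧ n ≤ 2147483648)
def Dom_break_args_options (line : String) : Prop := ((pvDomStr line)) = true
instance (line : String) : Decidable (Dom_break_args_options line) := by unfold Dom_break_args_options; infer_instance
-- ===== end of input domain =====

-- B computes the first-flag boundary once and slices, instead of A's build-and-pop loop; objective: simpler.

-- ===== PORT A =====
-- the for-loop over tokens with mutable args/options; options.pop(0) is exact as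
-- 'options.drop 1' here: options is a copy of tokens and is nonempty whenever pop runs
-- (one pop per already-visited token, and the loop has not run past tokens' end).
def pvALoop : List String → List String → List String → List String × List String
  | [], args, options => (args, options)
  | t :: rest, args, options =>
    if PySem.Str.startswith t "-" || PySem.Str.startswith t "--" then (args, options)
    else pvALoop rest (args ++ [t]) (options.drop 1)

def break_args_options (line : String) : String × String :=
  let tokens := (PySem.Str.split? line " ").getD []   -- sep " " ≠ "", so split? is always 'some'
  let (args, options) := pvALoop tokens [] tokens
  (PySem.Str.join " " args, PySem.Str.join " " options)

-- ===== PORT B =====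
-- next((i for i, t in enumerate(tokens) if t.startswith(("-","--"))), len(tokens))
def pvBIdx : List String → Nat
  | [] => 0
  | t :: rest =>
    if PySem.Str.startswith t "-" || PySem.Str.startswith t "--" then 0 else pvBIdx rest + 1

def break_args_options_alt (line : String) : String × String :=
  let tokens := (PySem.Str.split? line " ").getD []
  let idx := pvBIdx tokens
  -- tokens[:idx] / tokens[idx:] with 0 ≤ idx are take/drop (PySem.List.slice_to_natCast / slice_from_natCast)
  (PySem.Str.join " " (tokens.take idx), PySem.Str.join " " (tokens.drop idx))

-- ===== PRECONDITION & SPEC =====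
def Spec_break_args_options (line : String) (out : String × String) : Prop := out = break_args_options_alt line
instance (line : String) (out : String × String) : Decidable (Spec_break_args_options line out) := by unfold Spec_break_args_options; infer_instance

-- ===== CLAIM (what is proved, stated in full; the proofs are below) =====
def Claim_equal_break_args_options : Prop := ∀ (line : String), Dom_break_args_options line → Spec_break_args_options line (break_args_options line)

-- ===== LEMMAS AND PROOFS =====
theorem pvALoop_eq (ts : List String) (args : List String) :
    pvALoop ts args ts = (args ++ ts.take (pvBIdx ts), ts.drop (pvBIdx ts)) := by
  induction ts generalizing args with
  | nil => simp [pvALoop, pvBIdx]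
  | cons t rest ih =>
    simp only [pvALoop, pvBIdx]
    split_ifs with h
    · simp
    · simp [ih]

-- ===== VERDICT (by name: the statement is the Claim_ definition above) =====
theorem break_args_options_spec : Claim_equal_break_args_options := by
  intro line _
  unfold Spec_break_args_options break_args_options break_args_options_alt
  simp [pvALoop_eq]
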